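-- pv_equiv track=rewrite | github.com/combra-lab/snn-eeg | eegmmidb_loihi/online_loihi_inf/loihi_network.py | compute_core_list
-- ===== SOURCE A (Python) =====
-- def compute_core_list(neuron_dim, fanin, fanout, loihi_core_resource):
--     """
--     Compute core list base on loihi core resource
--     :param neuron_dim: number of neurons
--     :param fanin: incoming connections per neuron
--     :param fanout: outgoing connections per neuron
--     :param loihi_core_resource: list of dict for loihi core resource
--     :return: core_list
--     """
--     core_num = len(loihi_core_resource)
--     unassign_neuron = neuron_dim
--     core_list = []
--     for core in range(core_num):
--         while unassign_neuron > 0 and loihi_core_resource[core]['compartment'] > 0 and loihi_core_resource[core][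
--             'fanin'] >= fanin and loihi_core_resource[core]['fanout'] >= fanout:
--             core_list.append(core)
--             unassign_neuron -= 1
--             loihi_core_resource[core]['compartment'] -= 1
--             loihi_core_resource[core]['fanin'] -= fanin
--             loihi_core_resource[core]['fanout'] -= fanout
--         if unassign_neuron == 0:
--             break
--     return core_list
-- ===== SOURCE B (Python) =====
-- def compute_core_list(neuron_dim, fanin, fanout, loihi_core_resource):
--     """
--     Assign neurons to cores greedily.  Each core takes as many neurons as its
--     budgets allow, computed arithmetically: the count is capped by the
--     remaining neurons, the core's compartments, and (when a neuron needs any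
--     fan-in / fan-out at all) the fan-in / fan-out budget divided by the
--     per-neuron demand.  Resources are decremented in place accordingly.
--     """
--     core_list = []
--     remaining = neuron_dim
--     for core, res in enumerate(loihi_core_resource):
--         if remaining <= 0:
--             break
--         count = min(remaining, res['compartment'])
--         if fanin:
--             count = min(count, res['fanin'] // fanin)
--         if fanout:
--             count = min(count, res['fanout'] // fanout)
--         core_list.extend([core] * count)
--         res['compartment'] -= count
--         res['fanin'] -= count * fanin
--         res['fanout'] -= count * fanout
--         remaining -= count
--     return core_list
-- ===== Notes on version B (the rewrite author's own statement) =====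
-- stated objective: simpler
-- what changed: A's inner per-neuron while loop (one append and three dict updates per neuron) is replaced by a closed-form per-core count (min of remaining neurons, compartments, and the fan budgets floor-divided by the per-neuron demand), appending [core]*count at once; Pre_ restricts to the natural domain of nonnegative fanin/fanout and complete nonnegative resource dicts, since with negative demands or resources A's comparison-driven stop and with missing keys its short-circuit returns are accidents B does not mimic.
-- outside the precondition, e.g. on compute_core_list(1, 1, 1, [{'compartment': 0}]): A returns [], B raises KeyError; on compute_core_list(2, -1, -1, [{'compartment': 5, 'fanin': -10, 'fanout': -10}]): A returns [], B returns [0, 0]; on compute_core_list(1, 0, 0, [{'compartment': 1, 'fanin': -5, 'fanout': 0}]): A returns [], B returns [0]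
import Mathlib
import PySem

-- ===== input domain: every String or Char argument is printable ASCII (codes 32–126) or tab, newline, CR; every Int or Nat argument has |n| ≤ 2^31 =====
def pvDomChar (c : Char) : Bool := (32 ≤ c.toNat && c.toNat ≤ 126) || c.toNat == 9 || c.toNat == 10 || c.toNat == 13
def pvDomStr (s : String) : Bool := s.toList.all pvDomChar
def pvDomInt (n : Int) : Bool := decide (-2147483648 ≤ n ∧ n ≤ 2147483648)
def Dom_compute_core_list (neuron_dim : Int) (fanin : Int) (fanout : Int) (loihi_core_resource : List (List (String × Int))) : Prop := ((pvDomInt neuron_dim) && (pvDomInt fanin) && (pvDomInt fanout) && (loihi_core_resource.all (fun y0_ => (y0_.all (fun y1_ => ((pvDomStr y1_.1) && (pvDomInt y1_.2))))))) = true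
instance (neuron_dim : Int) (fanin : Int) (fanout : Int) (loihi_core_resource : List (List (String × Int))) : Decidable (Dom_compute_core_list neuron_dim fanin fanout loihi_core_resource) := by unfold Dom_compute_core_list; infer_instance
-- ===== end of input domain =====

-- B replaces A's per-neuron inner while loop by a closed-form per-core count (simpler).
-- Both Pythons mutate loihi_core_resource in place; the equivalence proved here is about the
-- RETURN value only (inside Pre_ the mutations coincide as well, but that is not stated).

-- ===== PORT A =====
-- inner while loop of A for one core: returns (indices appended for this core, remaining unassigned)
def pvInnerA (idx fanin fanout : Int) (u : Int) (d : PySem.Dict String Int) : List Int × Int :=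
  if h : 0 < u ∧ 0 < d.getD "compartment" 0 ∧ fanin ≤ d.getD "fanin" 0 ∧ fanout ≤ d.getD "fanout" 0 then
    let d1 := d.insert "compartment" (d.getD "compartment" 0 - 1)
    let d2 := d1.insert "fanin" (d1.getD "fanin" 0 - fanin)
    let d3 := d2.insert "fanout" (d2.getD "fanout" 0 - fanout)
    let r := pvInnerA idx fanin fanout (u - 1) d3
    (idx :: r.1, r.2)
  else ([], u)
termination_by u.toNat
decreasing_by omega

-- `for core in range(core_num)` with A's `if unassign_neuron == 0: break`
def pvOuterA (fanin fanout : Int) (cores : List (PySem.Dict String Int)) (idx : Int) (u : Int) : List Int :=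
  match cores with
  | [] => []
  | d :: rest =>
      let r := pvInnerA idx fanin fanout u d
      if r.2 = 0 then r.1 else r.1 ++ pvOuterA fanin fanout rest (idx + 1) r.2

def compute_core_list (neuron_dim : Int) (fanin : Int) (fanout : Int) (loihi_core_resource : List (List (String × Int))) : List Int :=
  pvOuterA fanin fanout (loihi_core_resource.map PySem.Dict.mk) 0 neuron_dim

-- ===== PORT B =====
def pvOuterB (fanin fanout : Int) (cores : List (PySem.Dict String Int)) (idx : Int) (u : Int) : List Int :=
  match cores with
  | [] => []
  | d :: rest =>
      if u ≤ 0 then []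
      else
        let c0 := min u (d.getD "compartment" 0)
        let c1 := if fanin ≠ 0 then min c0 (PySem.Int.floordiv (d.getD "fanin" 0) fanin) else c0
        let c2 := if fanout ≠ 0 then min c1 (PySem.Int.floordiv (d.getD "fanout" 0) fanout) else c1
        List.replicate c2.toNat idx ++ pvOuterB fanin fanout rest (idx + 1) (u - c2)

def compute_core_list_alt (neuron_dim : Int) (fanin : Int) (fanout : Int) (loihi_core_resource : List (List (String × Int))) : List Int :=
  pvOuterB fanin fanout (loihi_core_resource.map PySem.Dict.mk) 0 neuron_dim

-- ===== PRECONDITION & SPEC =====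
-- Pre_ restricts to the natural domain: nonnegative per-neuron fanin/fanout demands and core
-- dicts that carry all three resource keys with nonnegative values (or no neurons to assign at
-- all).  Outside it A may raise KeyError, or return a value produced by comparing against
-- negative demands/resources, an accident of its implementation that B does not mimic.
def Pre_compute_core_list (neuron_dim : Int) (fanin : Int) (fanout : Int) (loihi_core_resource : List (List (String × Int))) : Prop :=
  neuron_dim ≤ 0 ∨ (0 ≤ fanin ∧ 0 ≤ fanout ∧ ∀ d ∈ loihi_core_resource,
    ((PySem.Dict.mk d).get? "compartment").any (fun v => decide (0 ≤ v)) = true ∧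
    ((PySem.Dict.mk d).get? "fanin").any (fun v => decide (0 ≤ v)) = true ∧
    ((PySem.Dict.mk d).get? "fanout").any (fun v => decide (0 ≤ v)) = true)
instance (neuron_dim : Int) (fanin : Int) (fanout : Int) (loihi_core_resource : List (List (String × Int))) : Decidable (Pre_compute_core_list neuron_dim fanin fanout loihi_core_resource) := by unfold Pre_compute_core_list; infer_instance

def pvWitness_compute_core_list : Int × Int × Int × (List (List (String × Int))) :=
  (5, 2, 3, [[("compartment", 3), ("fanin", 10), ("fanout", 9)], [("compartment", 4), ("fanin", 8), ("fanout", 12)]])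

def Spec_compute_core_list (neuron_dim : Int) (fanin : Int) (fanout : Int) (loihi_core_resource : List (List (String × Int))) (out : List Int) : Prop := out = compute_core_list_alt neuron_dim fanin fanout loihi_core_resource
instance (neuron_dim : Int) (fanin : Int) (fanout : Int) (loihi_core_resource : List (List (String × Int))) (out : List Int) : Decidable (Spec_compute_core_list neuron_dim fanin fanout loihi_core_resource out) := by unfold Spec_compute_core_list; infer_instance

-- ===== CLAIM (what is proved, stated in full; the proofs are below) =====
def Claim_equal_compute_core_list : Prop := ∀ (neuron_dim : Int) (fanin : Int) (fanout : Int) (loihi_core_resource : List (List (String × Int))), Dom_compute_core_list neuron_dim fanin fanout loihi_core_resource → Pre_compute_core_list neuron_dim fanin fanout loihi_core_resource → Spec_compute_core_list neuron_dim fanin fanout loihi_core_resource (compute_core_list neuron_dim fanin fanout loihi_core_resource)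

-- ===== LEMMAS AND PROOFS =====

-- the per-core count, as B computes it
def pvCount (fanin fanout u comp fi fo : Int) : Int :=
  if fanout ≠ 0 then
    min (if fanin ≠ 0 then min (min u comp) (PySem.Int.floordiv fi fanin) else min u comp)
        (PySem.Int.floordiv fo fanout)
  else
    if fanin ≠ 0 then min (min u comp) (PySem.Int.floordiv fi fanin) else min u comp

lemma pv_fd_nonneg (a b : Int) (hb : 0 < b) (ha : 0 ≤ a) : 0 ≤ PySem.Int.floordiv a b := by
  rw [show (0 : Int) = 0 * b + 0 by ring] at ha ⊢
  rw [PySem.Int.le_floordiv_iff_mul_le hb]; omega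

lemma pv_fd_one_le (a b : Int) (hb : 0 < b) (hle : b ≤ a) : 1 ≤ PySem.Int.floordiv a b := by
  rw [PySem.Int.le_floordiv_iff_mul_le hb]; omega

lemma pv_fd_lt_one (a b : Int) (hb : 0 < b) (hlt : a < b) : PySem.Int.floordiv a b < 1 := by
  rw [PySem.Int.floordiv_lt_iff_lt_mul hb]; omega

lemma pv_fd_sub (a b : Int) (hb : 0 < b) :
    PySem.Int.floordiv (a - b) b = PySem.Int.floordiv a b - 1 := by
  rw [PySem.Int.floordiv_eq_ediv_of_pos hb, PySem.Int.floordiv_eq_ediv_of_pos hb]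
  have ha : a - b = a + (-1) * b := by ring
  rw [ha, Int.add_mul_ediv_right _ _ (by omega : b ≠ 0)]
  ring

lemma pvCount_nonneg (fanin fanout u comp fi fo : Int)
    (hin : 0 ≤ fanin) (hout : 0 ≤ fanout) (hu : 0 ≤ u) (hc : 0 ≤ comp) (hf : 0 ≤ fi) (hg : 0 ≤ fo) :
    0 ≤ pvCount fanin fanout u comp fi fo := by
  unfold pvCount
  by_cases h1 : fanin = 0 <;> by_cases h2 : fanout = 0 <;>
    simp only [h1, h2, ne_eq, not_true_eq_false, not_false_eq_true, if_true, if_false] <;>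
    [skip;
     have := pv_fd_nonneg fo fanout (by omega) hg;
     have := pv_fd_nonneg fi fanin (by omega) hf;
     (have := pv_fd_nonneg fi fanin (by omega) hf; have := pv_fd_nonneg fo fanout (by omega) hg)] <;>
    omega

lemma pvCount_le (fanin fanout u comp fi fo : Int) :
    pvCount fanin fanout u comp fi fo ≤ u := by
  unfold pvCount
  split_ifs <;> omega

lemma pvCount_zero (fanin fanout u comp fi fo : Int)
    (hin : 0 ≤ fanin) (hout : 0 ≤ fanout) (hu : 0 ≤ u) (hc : 0 ≤ comp) (hf : 0 ≤ fi) (hg : 0 ≤ fo)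
    (h : ¬(0 < u ∧ 0 < comp ∧ fanin ≤ fi ∧ fanout ≤ fo)) :
    pvCount fanin fanout u comp fi fo = 0 := by
  have hnn := pvCount_nonneg fanin fanout u comp fi fo hin hout hu hc hf hg
  unfold pvCount at hnn ⊢
  by_cases hui : 0 < u
  · by_cases hci : 0 < comp
    · -- one of the fan conditions fails
      rcases not_and_or.mp h with h' | h'
      · omega
      rcases not_and_or.mp h' with h' | h'
      · omega
      rcases not_and_or.mp h' with h' | h'
      · -- fi < fanin, hence fanin > 0 (fanin = 0 would give fanin ≤ fi from hf)
        have hp : 0 < fanin := by omega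
        have := pv_fd_lt_one fi fanin hp (by omega)
        have h1 : fanin ≠ 0 := by omega
        by_cases h2 : fanout = 0 <;> simp only [h1, h2, ne_eq, not_false_eq_true, if_true,
          not_true_eq_false, if_false] at hnn ⊢ <;> omega
      · have hp : 0 < fanout := by omega
        have := pv_fd_lt_one fo fanout hp (by omega)
        have h2 : fanout ≠ 0 := by omega
        simp only [h2, ne_eq, not_false_eq_true, ite_true] at hnn ⊢
        split_ifs at hnn ⊢ <;> omega
    · split_ifs at hnn ⊢ <;> omega
  · split_ifs at hnn ⊢ <;> omega

lemma pvCount_succ (fanin fanout u comp fi fo : Int)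
    (hin : 0 ≤ fanin) (hout : 0 ≤ fanout)
    (h : 0 < u ∧ 0 < comp ∧ fanin ≤ fi ∧ fanout ≤ fo) :
    pvCount fanin fanout u comp fi fo
      = 1 + pvCount fanin fanout (u - 1) (comp - 1) (fi - fanin) (fo - fanout) := by
  obtain ⟨hu, hc, hf, hg⟩ := h
  unfold pvCount
  by_cases h1 : fanin = 0 <;> by_cases h2 : fanout = 0
  · simp only [h1, h2, ne_eq, not_true_eq_false, ite_false]; omega
  · have hp2 : 0 < fanout := by omega
    have e2 := pv_fd_sub fo fanout hp2
    have l2 := pv_fd_one_le fo fanout hp2 hg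
    simp only [h1, h2, ne_eq, not_true_eq_false, not_false_eq_true, ite_false, ite_true, e2]
    omega
  · have hp1 : 0 < fanin := by omega
    have e1 := pv_fd_sub fi fanin hp1
    have l1 := pv_fd_one_le fi fanin hp1 hf
    simp only [h1, h2, ne_eq, not_true_eq_false, not_false_eq_true, ite_false, ite_true, e1]
    omega
  · have hp1 : 0 < fanin := by omega
    have hp2 : 0 < fanout := by omega
    have e1 := pv_fd_sub fi fanin hp1
    have e2 := pv_fd_sub fo fanout hp2
    have l1 := pv_fd_one_le fi fanin hp1 hf
    have l2 := pv_fd_one_le fo fanout hp2 hg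
    simp only [h1, h2, ne_eq, not_false_eq_true, ite_true, e1, e2]
    omega

-- A's inner loop appends exactly pvCount many copies of the core index (on the natural domain)
lemma innerA_eq (idx fanin fanout : Int) (u : Int) (d : PySem.Dict String Int)
    (hin : 0 ≤ fanin) (hout : 0 ≤ fanout) :
    0 ≤ u → 0 ≤ d.getD "compartment" 0 → 0 ≤ d.getD "fanin" 0 → 0 ≤ d.getD "fanout" 0 →
    pvInnerA idx fanin fanout u d
      = (List.replicate (pvCount fanin fanout u (d.getD "compartment" 0) (d.getD "fanin" 0) (d.getD "fanout" 0)).toNat idx,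
         u - pvCount fanin fanout u (d.getD "compartment" 0) (d.getD "fanin" 0) (d.getD "fanout" 0)) := by
  fun_induction pvInnerA idx fanin fanout u d with
  | case1 u d h d1 d2 d3 r ih =>
      intro hu hc hf hg
      have hcz : d3.getD "compartment" 0 = d.getD "compartment" 0 - 1 := by
        simp [d3, d2, d1, PySem.Dict.getD_insert]
      have hfz : d3.getD "fanin" 0 = d.getD "fanin" 0 - fanin := by
        simp [d3, d2, d1, PySem.Dict.getD_insert]
      have hgz : d3.getD "fanout" 0 = d.getD "fanout" 0 - fanout := by
        simp [d3, d2, d1, PySem.Dict.getD_insert]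
      have hr : r = pvInnerA idx fanin fanout (u - 1) d3 := rfl
      rw [hr, ih (by omega) (by omega) (by rw [hfz]; omega) (by rw [hgz]; omega)]
      rw [hcz, hfz, hgz, pvCount_succ _ _ _ _ _ _ hin hout h]
      have hnn := pvCount_nonneg fanin fanout (u - 1) (d.getD "compartment" 0 - 1)
        (d.getD "fanin" 0 - fanin) (d.getD "fanout" 0 - fanout) hin hout (by omega) (by omega)
        (by omega) (by omega)
      dsimp only
      rw [Prod.mk.injEq]
      constructor
      · have : (1 + pvCount fanin fanout (u - 1) (d.getD "compartment" 0 - 1)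
            (d.getD "fanin" 0 - fanin) (d.getD "fanout" 0 - fanout)).toNat
            = (pvCount fanin fanout (u - 1) (d.getD "compartment" 0 - 1)
              (d.getD "fanin" 0 - fanin) (d.getD "fanout" 0 - fanout)).toNat + 1 := by omega
        rw [this, List.replicate_succ]
      · omega
  | case2 u d h =>
      intro hu hc hf hg
      rw [pvCount_zero _ _ _ _ _ _ hin hout hu hc hf hg h]
      simp

lemma innerA_stop (idx fanin fanout : Int) (u : Int) (d : PySem.Dict String Int)
    (h : ¬(0 < u ∧ 0 < d.getD "compartment" 0 ∧ fanin ≤ d.getD "fanin" 0 ∧ fanout ≤ d.getD "fanout" 0)) :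
    pvInnerA idx fanin fanout u d = ([], u) := by
  rw [pvInnerA, dif_neg h]

lemma outerB_cons (fanin fanout : Int) (d : PySem.Dict String Int) (rest : List (PySem.Dict String Int)) (idx u : Int)
    (hu : ¬ u ≤ 0) :
    pvOuterB fanin fanout (d :: rest) idx u
      = List.replicate (pvCount fanin fanout u (d.getD "compartment" 0) (d.getD "fanin" 0) (d.getD "fanout" 0)).toNat idx
        ++ pvOuterB fanin fanout rest (idx + 1)
            (u - pvCount fanin fanout u (d.getD "compartment" 0) (d.getD "fanin" 0) (d.getD "fanout" 0)) := by
  rw [pvOuterB]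
  simp only [if_neg hu]
  rfl

lemma outerB_nonpos (fanin fanout : Int) (cores : List (PySem.Dict String Int)) (idx u : Int)
    (hu : u ≤ 0) : pvOuterB fanin fanout cores idx u = [] := by
  cases cores with
  | nil => rfl
  | cons d rest => simp [pvOuterB, hu]

lemma outerA_nonpos (fanin fanout : Int) (cores : List (PySem.Dict String Int)) (idx u : Int)
    (hu : u ≤ 0) : pvOuterA fanin fanout cores idx u = [] := by
  induction cores generalizing idx with
  | nil => rfl
  | cons d rest ih =>
      rw [pvOuterA, innerA_stop _ _ _ _ _ (by intro h; omega)]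
      dsimp only
      by_cases h0 : u = 0
      · rw [if_pos h0]
      · rw [if_neg h0, ih (idx + 1)]
        rfl

lemma outer_eq (fanin fanout : Int) (cores : List (PySem.Dict String Int)) (idx u : Int)
    (hin : 0 ≤ fanin) (hout : 0 ≤ fanout)
    (hres : ∀ d ∈ cores, 0 ≤ d.getD "compartment" 0 ∧ 0 ≤ d.getD "fanin" 0 ∧ 0 ≤ d.getD "fanout" 0) :
    pvOuterA fanin fanout cores idx u = pvOuterB fanin fanout cores idx u := by
  induction cores generalizing idx u with
  | nil => rfl
  | cons d rest ih =>
      by_cases hu : u ≤ 0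
      · rw [outerA_nonpos _ _ _ _ _ hu, outerB_nonpos _ _ _ _ _ hu]
      · obtain ⟨hc, hf, hg⟩ := hres d (List.mem_cons_self ..)
        have hrest : ∀ d' ∈ rest, 0 ≤ d'.getD "compartment" 0 ∧ 0 ≤ d'.getD "fanin" 0 ∧ 0 ≤ d'.getD "fanout" 0 :=
          fun d' hd' => hres d' (List.mem_cons_of_mem _ hd')
        rw [pvOuterA, innerA_eq _ _ _ _ _ hin hout (by omega) hc hf hg]
        have hc0 := pvCount_nonneg fanin fanout u (d.getD "compartment" 0) (d.getD "fanin" 0)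
          (d.getD "fanout" 0) hin hout (by omega) hc hf hg
        have hcu := pvCount_le fanin fanout u (d.getD "compartment" 0) (d.getD "fanin" 0) (d.getD "fanout" 0)
        rw [outerB_cons _ _ _ _ _ _ hu]
        by_cases hz : u - pvCount fanin fanout u (d.getD "compartment" 0) (d.getD "fanin" 0) (d.getD "fanout" 0) = 0
        · simp only [if_pos hz]
          rw [outerB_nonpos _ _ _ _ _ (by omega), List.append_nil]
        · simp only [if_neg hz]
          rw [ih _ _ hrest]

lemma getD_nonneg_of_any (d : PySem.Dict String Int) (k : String)
    (h : (d.get? k).any (fun v => decide (0 ≤ v)) = true) : 0 ≤ d.getD k 0 := by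
  cases hg : d.get? k with
  | none => rw [hg] at h; simp at h
  | some v =>
      rw [hg] at h
      simp only [Option.any_some, decide_eq_true_eq] at h
      rw [PySem.Dict.getD_eq_get?_getD, hg]
      simpa using h

-- ===== VERDICT (by name: the statement is the Claim_ definition above) =====
theorem compute_core_list_spec : Claim_equal_compute_core_list := by
  intro n fanin fanout res _ hpre
  unfold Spec_compute_core_list compute_core_list compute_core_list_alt
  rcases hpre with hn | ⟨hin, hout, hres⟩
  · rw [outerA_nonpos _ _ _ _ _ hn, outerB_nonpos _ _ _ _ _ hn]
  · apply outer_eq _ _ _ _ _ hin hout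
    intro d' hd'
    rcases List.mem_map.mp hd' with ⟨d, hd, rfl⟩
    obtain ⟨h1, h2, h3⟩ := hres d hd
    exact ⟨getD_nonneg_of_any _ _ h1, getD_nonneg_of_any _ _ h2, getD_nonneg_of_any _ _ h3⟩
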